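-- pv_equiv track=rewrite | github.com/lolboi06/CoSensei | terminal_stress_ai/code_generator_with_risks.py | format_code_with_risks_display
-- ===== SOURCE A (Python) =====
-- from typing import Dict, List, Any
--
-- def format_code_with_risks_display(files_with_risks: Dict) -> str:
--     """Format code files with highlighted risks for terminal display"""
--
--     output = []
--     output.append("\n" + "="*70)
--     output.append("ACTUAL CODE TEMPLATES - WITH SECURITY RISKS HIGHLIGHTED")
--     output.append("="*70 + "\n")
--
--     for filename, (code, risks, fixes) in files_with_risks.items():
--         output.append(f"\n[FILE] {filename}")
--         output.append("-"*70)
--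
--         # Show code sample (first 15 lines)
--         code_lines = code.split('\n')[:15]
--         for line in code_lines:
--             output.append(line)
--         output.append("    ... [code continues] ...\n")
--
--         # Show risks
--         output.append("[RISKS FOUND]:")
--         for severity, title, description in risks:
--             marker = "[CRITICAL]" if severity == "CRITICAL" else "[HIGH]" if severity == "HIGH" else "[MEDIUM]"
--             output.append(f"  {marker} {title}")
--             output.append(f"     -> {description}")
--
--         # Show fixes
--         output.append("\n[HOW TO FIX]:")
--         for i, fix in enumerate(fixes[:3], 1):
--             fix = fix.replace("[OK]", "[FIX]")
--             output.append(f"  {i}. {fix}")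
--         if len(fixes) > 3:
--             output.append(f"  ... and {len(fixes)-3} more fixes")
--
--         output.append("")
--
--     output.append("\n" + "="*70)
--     output.append("[SECURITY SUMMARY]")
--     output.append("="*70)
--
--     total_critical = sum(1 for _, (_, risks, _) in files_with_risks.items()
--                         for severity, _, _ in risks if severity == "CRITICAL")
--     total_high = sum(1 for _, (_, risks, _) in files_with_risks.items()
--                     for severity, _, _ in risks if severity == "HIGH")
--
--     output.append(f"\nTotal Vulnerabilities Found:")
--     output.append(f"  [CRITICAL]: {total_critical} (Must fix before deployment)")
--     output.append(f"  [HIGH]:     {total_high} (Should fix before deployment)")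
--     output.append("\nAll vulnerabilities have recommended fixes above!")
--     output.append("\nTIP: Use this output to implement secure code from the start!")
--     output.append("\n")
--
--     return "\n".join(output)
-- ===== SOURCE B (Python) =====
-- def _risk_block(risks):
--     """One pass over the risks: formatted lines plus CRITICAL/HIGH tallies."""
--     lines, crit, high = [], 0, 0
--     for severity, title, description in risks:
--         marker = "[CRITICAL]" if severity == "CRITICAL" else "[HIGH]" if severity == "HIGH" else "[MEDIUM]"
--         crit += severity == "CRITICAL"
--         high += severity == "HIGH"
--         lines += [f"  {marker} {title}", f"     -> {description}"]
--     return lines, crit, high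
--
--
-- def _file_block(filename, code, risks, fixes):
--     """All display lines for one file, plus its severity tallies."""
--     risk_lines, crit, high = _risk_block(risks)
--     lines = [f"\n[FILE] {filename}", "-" * 70]
--     lines += code.split('\n')[:15]
--     lines += ["    ... [code continues] ...\n", "[RISKS FOUND]:"]
--     lines += risk_lines
--     lines += ["\n[HOW TO FIX]:"]
--     lines += [f"  {i + 1}. {fix.replace('[OK]', '[FIX]')}"
--               for i, fix in enumerate(fixes[:3])]
--     if len(fixes) > 3:
--         lines += [f"  ... and {len(fixes) - 3} more fixes"]
--     lines += [""]
--     return lines, crit, high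
--
--
-- def format_code_with_risks_display(files_with_risks):
--     """Format code files with highlighted risks for terminal display"""
--     bar = "=" * 70
--     body, total_critical, total_high = [], 0, 0
--     for filename, (code, risks, fixes) in files_with_risks.items():
--         lines, crit, high = _file_block(filename, code, risks, fixes)
--         body += lines
--         total_critical += crit
--         total_high += high
--     return "\n".join(
--         ["\n" + bar, "ACTUAL CODE TEMPLATES - WITH SECURITY RISKS HIGHLIGHTED", bar + "\n"]
--         + body
--         + ["\n" + bar, "[SECURITY SUMMARY]", bar,
--            "\nTotal Vulnerabilities Found:",
--            f"  [CRITICAL]: {total_critical} (Must fix before deployment)",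
--            f"  [HIGH]:     {total_high} (Should fix before deployment)",
--            "\nAll vulnerabilities have recommended fixes above!",
--            "\nTIP: Use this output to implement secure code from the start!",
--            "\n"])
-- ===== Notes on version B (the rewrite author's own statement) =====
-- stated objective: alternative
-- what changed: B decomposes the work into per-file helper functions that return each file's display lines together with its CRITICAL/HIGH tallies in the same single pass, so the summary uses accumulated counters instead of A's two extra nested sum comprehensions over all files; output is byte-identical.
import Mathlib
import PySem

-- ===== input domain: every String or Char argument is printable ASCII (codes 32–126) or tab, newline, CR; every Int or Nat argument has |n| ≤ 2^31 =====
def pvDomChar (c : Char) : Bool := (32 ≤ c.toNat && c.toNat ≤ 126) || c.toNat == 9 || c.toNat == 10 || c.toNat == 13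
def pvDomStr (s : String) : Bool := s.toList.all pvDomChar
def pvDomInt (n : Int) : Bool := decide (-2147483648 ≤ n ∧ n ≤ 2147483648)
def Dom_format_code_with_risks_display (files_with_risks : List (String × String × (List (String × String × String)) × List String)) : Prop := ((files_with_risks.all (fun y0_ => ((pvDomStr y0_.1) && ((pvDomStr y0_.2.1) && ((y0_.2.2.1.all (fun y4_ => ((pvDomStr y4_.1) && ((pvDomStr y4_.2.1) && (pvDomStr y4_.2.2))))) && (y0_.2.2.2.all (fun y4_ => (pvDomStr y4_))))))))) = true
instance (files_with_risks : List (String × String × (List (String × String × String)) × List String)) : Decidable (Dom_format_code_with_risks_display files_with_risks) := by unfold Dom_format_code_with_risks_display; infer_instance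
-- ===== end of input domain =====

-- B restructures A into per-file helpers that return each file's lines together with its
-- CRITICAL/HIGH tallies in one pass, replacing A's two trailing nested sum comprehensions.
-- Output is byte-identical; same O(n) cost ("alternative" decomposition, not claimed faster).

-- ===== PORT A =====
def format_code_with_risks_display (files_with_risks : List (String × String × (List (String × String × String)) × List String)) : String :=
  let bar : String := String.ofList (List.replicate 70 '=')
  let output : List String :=
    [PySem.Str.join "" ["\n", bar],
     "ACTUAL CODE TEMPLATES - WITH SECURITY RISKS HIGHLIGHTED",
     PySem.Str.join "" [bar, "\n"]]
  let output := files_with_risks.foldl (fun output f =>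
    let filename := f.1
    let code := f.2.1
    let risks := f.2.2.1
    let fixes := f.2.2.2
    let output := output ++ [PySem.Str.join "" ["\n[FILE] ", filename], String.ofList (List.replicate 70 '-')]
    -- code sample (first 15 lines)
    let code_lines := PySem.List.slice ((PySem.Str.split? code "\n").getD []) none (some 15)
    let output := code_lines.foldl (fun o line => o ++ [line]) output
    let output := output ++ ["    ... [code continues] ...\n"]
    -- risks
    let output := output ++ ["[RISKS FOUND]:"]
    let output := risks.foldl (fun o r =>
      let marker := if r.1 == "CRITICAL" then "[CRITICAL]" else if r.1 == "HIGH" then "[HIGH]" else "[MEDIUM]"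
      o ++ [PySem.Str.join "" ["  ", marker, " ", r.2.1]] ++ [PySem.Str.join "" ["     -> ", r.2.2]]) output
    -- fixes
    let output := output ++ ["\n[HOW TO FIX]:"]
    let st := (PySem.List.slice fixes none (some 3)).foldl (fun (st : List String × Int) fx =>
      let fx := PySem.Str.replace fx "[OK]" "[FIX]"
      (st.1 ++ [PySem.Str.join "" ["  ", PySem.Int.toStr st.2, ". ", fx]], st.2 + 1)) (output, (1 : Int))
    let output := st.1
    let output := if fixes.length > 3
      then output ++ [PySem.Str.join "" ["  ... and ", PySem.Int.toStr ((fixes.length : Int) - 3), " more fixes"]]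
      else output
    output ++ [""]) output
  let output := output ++ [PySem.Str.join "" ["\n", bar], "[SECURITY SUMMARY]", bar]
  let total_critical : Int := files_with_risks.foldl (fun a f =>
    f.2.2.1.foldl (fun a r => if r.1 == "CRITICAL" then a + 1 else a) a) 0
  let total_high : Int := files_with_risks.foldl (fun a f =>
    f.2.2.1.foldl (fun a r => if r.1 == "HIGH" then a + 1 else a) a) 0
  let output := output ++
    ["\nTotal Vulnerabilities Found:",
     PySem.Str.join "" ["  [CRITICAL]: ", PySem.Int.toStr total_critical, " (Must fix before deployment)"],
     PySem.Str.join "" ["  [HIGH]:     ", PySem.Int.toStr total_high, " (Should fix before deployment)"],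
     "\nAll vulnerabilities have recommended fixes above!",
     "\nTIP: Use this output to implement secure code from the start!",
     "\n"]
  PySem.Str.join "\n" output

-- ===== PORT B =====
-- one pass over the risks: formatted lines plus CRITICAL/HIGH tallies
def pvRiskBlock (risks : List (String × String × String)) : List String × Int × Int :=
  risks.foldl (fun st r =>
    let marker := if r.1 == "CRITICAL" then "[CRITICAL]" else if r.1 == "HIGH" then "[HIGH]" else "[MEDIUM]"
    (st.1 ++ [PySem.Str.join "" ["  ", marker, " ", r.2.1], PySem.Str.join "" ["     -> ", r.2.2]],
     st.2.1 + (if r.1 == "CRITICAL" then 1 else 0),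
     st.2.2 + (if r.1 == "HIGH" then 1 else 0)))
    (([] : List String), (0 : Int), (0 : Int))

-- all display lines for one file, plus its severity tallies
def pvFileBlock (filename code : String) (risks : List (String × String × String)) (fixes : List String) : List String × Int × Int :=
  let rch := pvRiskBlock risks
  ([PySem.Str.join "" ["\n[FILE] ", filename], String.ofList (List.replicate 70 '-')]
     ++ ((PySem.Str.split? code "\n").getD []).take 15
     ++ ["    ... [code continues] ...\n", "[RISKS FOUND]:"]
     ++ rch.1
     ++ ["\n[HOW TO FIX]:"]
     ++ (PySem.List.enumerate (fixes.take 3) 0).map (fun p =>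
          PySem.Str.join "" ["  ", PySem.Int.toStr (p.1 + 1), ". ", PySem.Str.replace p.2 "[OK]" "[FIX]"])
     ++ (if fixes.length > 3
         then [PySem.Str.join "" ["  ... and ", PySem.Int.toStr ((fixes.length : Int) - 3), " more fixes"]]
         else [])
     ++ [""],
   rch.2.1, rch.2.2)

def format_code_with_risks_display_alt (files_with_risks : List (String × String × (List (String × String × String)) × List String)) : String :=
  let bar : String := String.ofList (List.replicate 70 '=')
  let acc := files_with_risks.foldl (fun acc f =>
    let lch := pvFileBlock f.1 f.2.1 f.2.2.1 f.2.2.2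
    (acc.1 ++ lch.1, acc.2.1 + lch.2.1, acc.2.2 + lch.2.2))
    (([] : List String), (0 : Int), (0 : Int))
  PySem.Str.join "\n"
    ([PySem.Str.join "" ["\n", bar],
      "ACTUAL CODE TEMPLATES - WITH SECURITY RISKS HIGHLIGHTED",
      PySem.Str.join "" [bar, "\n"]]
     ++ acc.1
     ++ [PySem.Str.join "" ["\n", bar], "[SECURITY SUMMARY]", bar,
         "\nTotal Vulnerabilities Found:",
         PySem.Str.join "" ["  [CRITICAL]: ", PySem.Int.toStr acc.2.1, " (Must fix before deployment)"],
         PySem.Str.join "" ["  [HIGH]:     ", PySem.Int.toStr acc.2.2, " (Should fix before deployment)"],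
         "\nAll vulnerabilities have recommended fixes above!",
         "\nTIP: Use this output to implement secure code from the start!",
         "\n"])

-- ===== PRECONDITION & SPEC =====
-- A's parameter is a Python dict, which cannot hold two entries with the same filename; Pre_
-- excludes association lists with duplicate filenames, which do not represent any dict input of A.
def Pre_format_code_with_risks_display (files_with_risks : List (String × String × (List (String × String × String)) × List String)) : Prop :=
  (files_with_risks.map Prod.fst).Nodup
instance (files_with_risks : List (String × String × (List (String × String × String)) × List String)) : Decidable (Pre_format_code_with_risks_display files_with_risks) := by unfold Pre_format_code_with_risks_display; infer_instance

def pvWitness_format_code_with_risks_display : (List (String × String × (List (String × String × String)) × List String)) :=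
  [("a.py", ("x = 1\ny = 2", [("CRITICAL", "t", "d"), ("LOW", "u", "e")], ["use [OK] env vars", "f2", "f3", "f4"]))]

def Spec_format_code_with_risks_display (files_with_risks : List (String × String × (List (String × String × String)) × List String)) (out : String) : Prop := out = format_code_with_risks_display_alt files_with_risks
instance (files_with_risks : List (String × String × (List (String × String × String)) × List String)) (out : String) : Decidable (Spec_format_code_with_risks_display files_with_risks out) := by unfold Spec_format_code_with_risks_display; infer_instance

-- ===== CLAIM (what is proved, stated in full; the proofs are below) =====
def Claim_equal_format_code_with_risks_display : Prop := ∀ (files_with_risks : List (String × String × (List (String × String × String)) × List String)), Dom_format_code_with_risks_display files_with_risks → Pre_format_code_with_risks_display files_with_risks → Spec_format_code_with_risks_display files_with_risks (format_code_with_risks_display files_with_risks)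

-- ===== LEMMAS AND PROOFS =====

-- B's risk pass over any starting accumulator.
theorem pvRiskBlock_fold (risks : List (String × String × String)) : ∀ (st : List String × Int × Int),
    risks.foldl (fun st r =>
      let marker := if r.1 == "CRITICAL" then "[CRITICAL]" else if r.1 == "HIGH" then "[HIGH]" else "[MEDIUM]"
      (st.1 ++ [PySem.Str.join "" ["  ", marker, " ", r.2.1], PySem.Str.join "" ["     -> ", r.2.2]],
       st.2.1 + (if r.1 == "CRITICAL" then 1 else 0),
       st.2.2 + (if r.1 == "HIGH" then 1 else 0))) st
    = (st.1 ++ risks.flatMap (fun r =>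
        [PySem.Str.join "" ["  ", if r.1 == "CRITICAL" then "[CRITICAL]" else if r.1 == "HIGH" then "[HIGH]" else "[MEDIUM]", " ", r.2.1],
         PySem.Str.join "" ["     -> ", r.2.2]]),
       st.2.1 + (risks.countP (fun r => r.1 == "CRITICAL") : Int),
       st.2.2 + (risks.countP (fun r => r.1 == "HIGH") : Int)) := by
  induction risks with
  | nil => intro st; simp
  | cons r rs ih =>
    intro st
    simp only [List.foldl_cons, List.flatMap_cons, List.countP_cons, ih]
    refine Prod.ext ?_ (Prod.ext ?_ ?_) <;> simp <;> split_ifs <;> ring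

-- B's risk pass, characterized: lines are a flatMap, tallies are countP's.
theorem pvRiskBlock_eq (risks : List (String × String × String)) :
    pvRiskBlock risks =
      (risks.flatMap (fun r =>
        [PySem.Str.join "" ["  ", if r.1 == "CRITICAL" then "[CRITICAL]" else if r.1 == "HIGH" then "[HIGH]" else "[MEDIUM]", " ", r.2.1],
         PySem.Str.join "" ["     -> ", r.2.2]]),
       (risks.countP (fun r => r.1 == "CRITICAL") : Int),
       (risks.countP (fun r => r.1 == "HIGH") : Int)) := by
  have h := pvRiskBlock_fold risks (([] : List String), (0 : Int), (0 : Int))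
  simpa [pvRiskBlock] using h

-- A's fix loop with a running counter equals B's enumerate-map.
theorem fixLoop_eq (fs : List String) : ∀ (o : List String) (i : Int),
    (fs.foldl (fun (st : List String × Int) fx =>
        (st.1 ++ [PySem.Str.join "" ["  ", PySem.Int.toStr st.2, ". ", PySem.Str.replace fx "[OK]" "[FIX]"]], st.2 + 1)) (o, i)).1
      = o ++ (PySem.List.enumerate fs i).map (fun p =>
          PySem.Str.join "" ["  ", PySem.Int.toStr p.1, ". ", PySem.Str.replace p.2 "[OK]" "[FIX]"]) := by
  induction fs with
  | nil => intro o i; simp [PySem.List.enumerate_nil]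
  | cons fx fs ih =>
    intro o i
    simp only [List.foldl_cons, PySem.List.enumerate_cons, List.map_cons, ih, List.append_assoc,
      List.cons_append, List.nil_append]

-- shifting the enumerate start by one
theorem enumerate_shift (fs : List String) : ∀ (i : Int),
    (PySem.List.enumerate fs i).map (fun p =>
        PySem.Str.join "" ["  ", PySem.Int.toStr (p.1 + 1), ". ", PySem.Str.replace p.2 "[OK]" "[FIX]"])
      = (PySem.List.enumerate fs (i + 1)).map (fun p =>
        PySem.Str.join "" ["  ", PySem.Int.toStr p.1, ". ", PySem.Str.replace p.2 "[OK]" "[FIX]"]) := by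
  induction fs with
  | nil => intro i; simp [PySem.List.enumerate_nil]
  | cons fx fs ih =>
    intro i
    simp only [PySem.List.enumerate_cons, List.map_cons, ih]

theorem flatten_take_map_singleton {α : Type} (l : List α) (n : Nat) :
    (List.take n (l.map (fun x => [x]))).flatten = l.take n := by
  rw [← List.map_take]
  induction l.take n with
  | nil => simp
  | cons a t ih => simp [ih]

-- A's per-file body appends exactly B's file block lines.
theorem fileStep_eq (f : String × String × (List (String × String × String)) × List String) (output : List String) :
    (let filename := f.1
     let code := f.2.1
     let risks := f.2.2.1
     let fixes := f.2.2.2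
     let output := output ++ [PySem.Str.join "" ["\n[FILE] ", filename], String.ofList (List.replicate 70 '-')]
     let code_lines := PySem.List.slice ((PySem.Str.split? code "\n").getD []) none (some 15)
     let output := code_lines.foldl (fun o line => o ++ [line]) output
     let output := output ++ ["    ... [code continues] ...\n"]
     let output := output ++ ["[RISKS FOUND]:"]
     let output := risks.foldl (fun o r =>
       let marker := if r.1 == "CRITICAL" then "[CRITICAL]" else if r.1 == "HIGH" then "[HIGH]" else "[MEDIUM]"
       o ++ [PySem.Str.join "" ["  ", marker, " ", r.2.1]] ++ [PySem.Str.join "" ["     -> ", r.2.2]]) output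
     let output := output ++ ["\n[HOW TO FIX]:"]
     let st := (PySem.List.slice fixes none (some 3)).foldl (fun (st : List String × Int) fx =>
       let fx := PySem.Str.replace fx "[OK]" "[FIX]"
       (st.1 ++ [PySem.Str.join "" ["  ", PySem.Int.toStr st.2, ". ", fx]], st.2 + 1)) (output, (1 : Int))
     let output := st.1
     let output := if fixes.length > 3
       then output ++ [PySem.Str.join "" ["  ... and ", PySem.Int.toStr ((fixes.length : Int) - 3), " more fixes"]]
       else output
     output ++ [""])
      = output ++ (pvFileBlock f.1 f.2.1 f.2.2.1 f.2.2.2).1 := by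
  have hslice3 : PySem.List.slice f.2.2.2 none (some 3) = f.2.2.2.take 3 := by simp [pysem]
  have hslice15 : PySem.List.slice ((PySem.Str.split? f.2.1 "\n").getD []) none (some 15)
      = ((PySem.Str.split? f.2.1 "\n").getD []).take 15 := by simp [pysem]
  by_cases h : 3 < f.2.2.2.length <;>
    simp [pvFileBlock, pvRiskBlock_eq, hslice3, hslice15, h,
      fixLoop_eq, enumerate_shift, List.flatMap_def, flatten_take_map_singleton,
      List.append_assoc]

-- B's main fold, characterized against a fresh accumulator.
theorem mainFold_eq (files : List (String × String × (List (String × String × String)) × List String)) :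
    ∀ (acc : List String × Int × Int),
    files.foldl (fun acc f =>
        let lch := pvFileBlock f.1 f.2.1 f.2.2.1 f.2.2.2
        (acc.1 ++ lch.1, acc.2.1 + lch.2.1, acc.2.2 + lch.2.2)) acc
      = (acc.1 ++ files.flatMap (fun f => (pvFileBlock f.1 f.2.1 f.2.2.1 f.2.2.2).1),
         acc.2.1 + (files.map (fun f => ((f.2.2.1.countP (fun r => r.1 == "CRITICAL") : Nat) : Int))).sum,
         acc.2.2 + (files.map (fun f => ((f.2.2.1.countP (fun r => r.1 == "HIGH") : Nat) : Int))).sum) := by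
  induction files with
  | nil => intro acc; simp
  | cons f fs ih =>
    intro acc
    have hc : (pvFileBlock f.1 f.2.1 f.2.2.1 f.2.2.2).2.1 = (f.2.2.1.countP (fun r => r.1 == "CRITICAL") : Int) := by
      simp [pvFileBlock, pvRiskBlock_eq]
    have hh : (pvFileBlock f.1 f.2.1 f.2.2.1 f.2.2.2).2.2 = (f.2.2.1.countP (fun r => r.1 == "HIGH") : Int) := by
      simp [pvFileBlock, pvRiskBlock_eq]
    simp only [List.foldl_cons, List.flatMap_cons, List.map_cons, List.sum_cons, ih, hc, hh]
    refine Prod.ext ?_ (Prod.ext ?_ ?_) <;> simp <;> ring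

-- A's trailing nested counting loop, characterized.
theorem countLoop_eq (p : String × String × String → Bool)
    (files : List (String × String × (List (String × String × String)) × List String)) :
    ∀ (a : Int),
    files.foldl (fun a f => f.2.2.1.foldl (fun a r => if p r then a + 1 else a) a) a
      = a + (files.map (fun f => ((f.2.2.1.countP p : Nat) : Int))).sum := by
  intro a
  simp only [PySem.List.foldl_if_add_one, PySem.List.foldl_add]

-- ===== VERDICT (by name: the statement is the Claim_ definition above) =====
theorem format_code_with_risks_display_spec : Claim_equal_format_code_with_risks_display := by
  intro files hd hp
  clear hd hp
  unfold Spec_format_code_with_risks_display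
  unfold format_code_with_risks_display format_code_with_risks_display_alt
  dsimp only
  rw [mainFold_eq]
  -- collapse A's main loop into header ++ flatMap of per-file blocks
  have hA : ∀ (o : List String),
      files.foldl (fun output f =>
        (let filename := f.1
         let code := f.2.1
         let risks := f.2.2.1
         let fixes := f.2.2.2
         let output := output ++ [PySem.Str.join "" ["\n[FILE] ", filename], String.ofList (List.replicate 70 '-')]
         let code_lines := PySem.List.slice ((PySem.Str.split? code "\n").getD []) none (some 15)
         let output := code_lines.foldl (fun o line => o ++ [line]) output
         let output := output ++ ["    ... [code continues] ...\n"]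
         let output := output ++ ["[RISKS FOUND]:"]
         let output := risks.foldl (fun o r =>
           let marker := if r.1 == "CRITICAL" then "[CRITICAL]" else if r.1 == "HIGH" then "[HIGH]" else "[MEDIUM]"
           o ++ [PySem.Str.join "" ["  ", marker, " ", r.2.1]] ++ [PySem.Str.join "" ["     -> ", r.2.2]]) output
         let output := output ++ ["\n[HOW TO FIX]:"]
         let st := (PySem.List.slice fixes none (some 3)).foldl (fun (st : List String × Int) fx =>
           let fx := PySem.Str.replace fx "[OK]" "[FIX]"
           (st.1 ++ [PySem.Str.join "" ["  ", PySem.Int.toStr st.2, ". ", fx]], st.2 + 1)) (output, (1 : Int))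
         let output := st.1
         let output := if fixes.length > 3
           then output ++ [PySem.Str.join "" ["  ... and ", PySem.Int.toStr ((fixes.length : Int) - 3), " more fixes"]]
           else output
         output ++ [""])) o
      = o ++ files.flatMap (fun f => (pvFileBlock f.1 f.2.1 f.2.2.1 f.2.2.2).1) := by
    induction files with
    | nil => intro o; simp
    | cons f fs ih =>
      intro o
      simp only [List.foldl_cons, List.flatMap_cons]
      rw [fileStep_eq f o, ih, List.append_assoc]
  rw [hA]
  -- A's two trailing sums are the counters B accumulated
  rw [countLoop_eq, countLoop_eq]
  simp [List.append_assoc]
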